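-- pv_equiv track=rewrite | github.com/minnseong/Algorithm | programmers/Test/CJOliveNetworks_Q3.py | solution
-- ===== SOURCE A (Python) =====
-- from itertools import combinations
-- from collections import Counter
--
-- def solution(s, n):
--     answer = 300000
--
--     for combi in combinations(range(1, len(s)-1), n):
--         cnt = 0
--         for idx, c in enumerate(combi):
--             if idx == 0:
--                 counter = Counter(s[:c])
--                 for ss in list(set(s[:c])):
--                     cnt = max(cnt, counter[ss])
--             else:
--                 counter = Counter(s[combi[idx-1]:c])
--                 for ss in list(set(s[combi[idx-1]:c])):
--                     cnt = max(cnt, counter[ss])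
--
--         counter = Counter(s[combi[-1]:])
--         for ss in list(set(s[combi[-1]:])):
--             cnt = max(cnt, counter[ss])
--
--         answer= min(cnt, answer)
--
--     return answer
-- ===== SOURCE B (Python) =====
-- # B: dynamic programming over cut positions (memoized recursion) instead of
-- # enumerating all C(len(s)-2, n) cut combinations.
-- def solution(s, n):
--     L = len(s)
--     if n > max(L - 2, 0):
--         return 300000  # more cuts than available positions: no valid partition
--
--     mfmemo = {}
--
--     def mf(i, j):
--         # max frequency of a single character in s[i:j]
--         if (i, j) not in mfmemo:
--             sub = s[i:j]
--             mfmemo[(i, j)] = max((sub.count(c) for c in set(sub)), default=0)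
--         return mfmemo[(i, j)]
--
--     dpmemo = {}
--
--     def dp(prev, k):
--         # best achievable max-segment-frequency for s[prev:] using exactly k
--         # more cuts, all taken from (prev, L-2]; None when impossible
--         if k <= 0:
--             return mf(prev, L)
--         if (prev, k) not in dpmemo:
--             best = None
--             for c in range(prev + 1, L - 1):
--                 rest = dp(c, k - 1)
--                 if rest is None:
--                     continue
--                 v = max(mf(prev, c), rest)
--                 if best is None or v < best:
--                     best = v
--             dpmemo[(prev, k)] = best
--         return dpmemo[(prev, k)]
--
--     res = dp(0, n)
--     return 300000 if res is None else min(res, 300000)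
-- ===== Notes on version B (the rewrite author's own statement) =====
-- stated objective: faster
-- what changed: Replaces A's exhaustive enumeration of all C(len(s)-2, n) cut combinations (each rescanned segment by segment with Counter) by a memoized dynamic-programming recursion dp(prev, k) = min over next cut c of max(maxfreq(s[prev:c]), dp(c, k-1)), with memoized segment max-frequencies.
-- crash fix: For n <= 0 A raises (IndexError via combi[-1] when n = 0, ValueError from combinations when n < 0) while B returns the capped max character frequency of the whole string, i.e. treats n <= 0 as zero cuts. — e.g. on solution("ab", 0): A raises IndexError, B returns 1
import Mathlib
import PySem

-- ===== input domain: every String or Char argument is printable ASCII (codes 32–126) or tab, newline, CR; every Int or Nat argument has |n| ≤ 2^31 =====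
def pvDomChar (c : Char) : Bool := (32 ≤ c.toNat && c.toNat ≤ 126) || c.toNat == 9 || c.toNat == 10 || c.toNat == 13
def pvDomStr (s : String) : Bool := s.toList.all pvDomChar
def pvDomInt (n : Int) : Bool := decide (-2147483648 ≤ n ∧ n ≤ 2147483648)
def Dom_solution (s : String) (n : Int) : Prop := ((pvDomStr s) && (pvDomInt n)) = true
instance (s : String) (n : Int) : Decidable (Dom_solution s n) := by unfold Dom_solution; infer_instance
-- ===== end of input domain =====

-- B replaces A's enumeration of all C(len(s)-2, n) cut combinations by a DP recursion over
-- (position of previous cut, cuts left); same return value on every input A returns on with n ≥ 1.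

-- ===== PORT A =====
-- A's inner loop 'counter = Counter(seg); for ss in list(set(seg)): cnt = max(cnt, counter[ss])'.
-- Python iterates list(set(..)) in hash order; the running max is order-independent, so the
-- Set.ofList (first-occurrence) order is exact.
def pvMaxRunA (cnt : Int) (seg : List Char) : Int :=
  let counter := PySem.Dict.counter seg
  (PySem.Set.ofList seg).foldl (fun acc ss => max acc (counter.getD ss 0)) cnt

-- the 'for idx, c in enumerate(combi)' loop plus the trailing s[combi[-1]:] block, as the obvious
-- structural recursion carrying the previous cut (0 before the loop, combi[idx-1] inside, combi[-1]
-- after).  For combi = [] Python raises IndexError on combi[-1] (only reachable when n = 0, which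
-- Pre_solution excludes); the recursion then reads the whole string instead.
def pvGoA (t : List Char) : Int → List Int → Int → Int
  | prev, [], cnt => pvMaxRunA cnt (PySem.List.slice t (some prev) none)
  | prev, c :: rest, cnt => pvGoA t c rest (pvMaxRunA cnt (PySem.List.slice t (some prev) (some c)))

-- itertools.combinations(range(1, len(s)-1), n) is PySem.List.combinations / pyRange.
-- For n < 0 Python raises ValueError (excluded by Pre_solution); n.toNat is exact for n ≥ 0.
def solution (s : String) (n : Int) : Int :=
  let t := s.toList
  (PySem.List.combinations (PySem.List.pyRange 1 ((t.length : Int) - 1) 1) n.toNat).foldl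
    (fun answer combi => min (pvGoA t 0 combi 0) answer) 300000

-- ===== PORT B =====
-- Source B's mf(i, j): max((sub.count(c) for c in set(sub)), default=0); the fold starts at the
-- default 0, exact since every count of a member is ≥ 1.
def pvMfB (t : List Char) (i j : Int) : Int :=
  let sub := PySem.List.slice t (some i) (some j)
  (PySem.Set.ofList sub).foldl (fun best c => max best ((sub.count c : Nat) : Int)) 0

-- Source B's dp(prev, k) (memoisation is an evaluation cache; the recurrence is identical).
def pvDpB (t : List Char) : Nat → Int → Option Int
  | 0, prev => some (pvMfB t prev (t.length : Int))
  | k + 1, prev =>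
    (PySem.List.pyRange (prev + 1) ((t.length : Int) - 1) 1).foldl
      (fun best c =>
        match pvDpB t k c with
        | none => best
        | some rest =>
          let v := max (pvMfB t prev c) rest
          match best with
          | none => some v
          | some b => if v < b then some v else some b)
      none

-- Source B's dp treats k ≤ 0 as the no-more-cuts base case, which n.toNat reproduces exactly.
def solution_alt (s : String) (n : Int) : Int :=
  let t := s.toList
  if n > max ((t.length : Int) - 2) 0 then 300000
  else
    match pvDpB t n.toNat 0 with
    | none => 300000
    | some res => min res 300000

-- ===== PRECONDITION & SPEC =====
-- A raises on every n ≤ 0 (IndexError via combi[-1] for n = 0, ValueError from combinations for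
-- n < 0); it returns normally for every n ≥ 1, so Pre_ excludes nothing A returns on.
def Pre_solution (s : String) (n : Int) : Prop := 1 ≤ n
instance (s : String) (n : Int) : Decidable (Pre_solution s n) := by unfold Pre_solution; infer_instance
def pvWitness_solution : String × Int := ("aab", 1)

-- For n ≤ 0 A raises (IndexError for n = 0, ValueError for n < 0) while B returns the capped
-- max character frequency of the whole string (zero cuts).
def Raises_solution (s : String) (n : Int) : Prop := n ≤ 0
instance (s : String) (n : Int) : Decidable (Raises_solution s n) := by unfold Raises_solution; infer_instance
def pvRaiseWitness_solution : String × Int := ("ab", 0)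
def pvRaiseWitnessOut_solution : Int := 1

def Spec_solution (s : String) (n : Int) (out : Int) : Prop := out = solution_alt s n
instance (s : String) (n : Int) (out : Int) : Decidable (Spec_solution s n out) := by unfold Spec_solution; infer_instance

-- ===== CLAIM (what is proved, stated in full; the proofs are below) =====
def Claim_equal_solution : Prop := ∀ (s : String) (n : Int), Dom_solution s n → Pre_solution s n → Spec_solution s n (solution s n)
def Claim_raises_solution : Prop := (∀ (s : String) (n : Int), Dom_solution s n → Raises_solution s n → ¬ Pre_solution s n) ∧ (Dom_solution (pvRaiseWitness_solution.1) (pvRaiseWitness_solution.2) ∧ Raises_solution (pvRaiseWitness_solution.1) (pvRaiseWitness_solution.2) ∧ solution_alt (pvRaiseWitness_solution.1) (pvRaiseWitness_solution.2) = pvRaiseWitnessOut_solution)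

-- ===== LEMMAS AND PROOFS =====

-- the cost of one combination of cuts: max over the induced segments of pvMfB
def pvCost (t : List Char) : Int → List Int → Int
  | prev, [] => pvMfB t prev (t.length : Int)
  | prev, c :: cs => max (pvMfB t prev c) (pvCost t c cs)

-- min of a list of costs, none for the empty list
def pvMList : List Int → Option Int
  | [] => none
  | x :: xs => match pvMList xs with | none => some x | some b => some (min x b)

def pvOMin : Option Int → Option Int → Option Int
  | none, y => y
  | some a, none => some a
  | some a, some b => some (min a b)

def pvOMax (v : Int) : Option Int → Option Int
  | none => none
  | some b => some (max v b)

theorem pvOMin_none_right (x : Option Int) : pvOMin x none = x := by cases x <;> rfl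

theorem pvOMin_assoc (x y z : Option Int) : pvOMin (pvOMin x y) z = pvOMin x (pvOMin y z) := by
  cases x <;> cases y <;> cases z <;> simp [pvOMin, min_assoc]

theorem pvMList_append (l₁ l₂ : List Int) :
    pvMList (l₁ ++ l₂) = pvOMin (pvMList l₁) (pvMList l₂) := by
  induction l₁ with
  | nil => simp [pvMList, pvOMin]
  | cons x xs ih =>
    simp only [List.cons_append, pvMList, ih]
    cases h1 : pvMList xs <;> cases h2 : pvMList l₂ <;> simp [pvOMin, min_assoc]

theorem pvMList_map_max {α : Type} (v : Int) (g : α → Int) (l : List α) :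
    pvMList (l.map (fun x => max v (g x))) = pvOMax v (pvMList (l.map g)) := by
  induction l with
  | nil => rfl
  | cons x xs ih =>
    simp only [List.map_cons, pvMList, ih]
    cases h : pvMList (xs.map g) <;> simp [pvOMax, max_min_distrib_left]

-- a running max started at i ≥ 0 is max i (the run started at 0)
theorem pv_foldl_max_pull (f : Char → Int) (l : List Char) (i : Int) (hi : 0 ≤ i) :
    l.foldl (fun a c => max a (f c)) i = max i (l.foldl (fun a c => max a (f c)) 0) := by
  induction l generalizing i with
  | nil => simp; omega
  | cons x xs ih =>
    simp only [List.foldl_cons]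
    rw [ih (max i (f x)) (by omega), ih (max 0 (f x)) (by omega)]
    omega

theorem pvMfB_nonneg (t : List Char) (a b : Int) : 0 ≤ pvMfB t a b :=
  (PySem.List.le_foldl_max_int _ _ 0).1

theorem pvCost_nonneg (t : List Char) (prev : Int) (cs : List Int) : 0 ≤ pvCost t prev cs := by
  induction cs generalizing prev with
  | nil => exact pvMfB_nonneg t prev _
  | cons c cs ih => exact le_max_of_le_right (ih c)

-- A's slice s[a:] equals s[a:len(s)] for a ≥ 0
theorem pv_slice_from_eq (t : List Char) (a : Int) (ha : 0 ≤ a) :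
    PySem.List.slice t (some a) none = PySem.List.slice t (some a) (some (t.length : Int)) := by
  rw [PySem.List.slice_from _ ha, PySem.List.slice_toNat _ ha (by positivity)]
  simp

-- A's Counter/set loop is max cnt (pvMfB of the slice)
theorem pvMaxRunA_eq (t : List Char) (cnt a b : Int) (hc : 0 ≤ cnt) :
    pvMaxRunA cnt (PySem.List.slice t (some a) (some b)) = max cnt (pvMfB t a b) := by
  unfold pvMaxRunA pvMfB
  dsimp only
  rw [PySem.List.foldl_congr_mem (PySem.Set.ofList (PySem.List.slice t (some a) (some b)))
    (fun acc ss => max acc ((PySem.Dict.counter (PySem.List.slice t (some a) (some b))).getD ss 0))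
    (fun acc ss => max acc ((List.count ss (PySem.List.slice t (some a) (some b)) : Nat) : Int))
    cnt (fun acc x _ => by simp [PySem.Dict.getD_counter])]
  exact pv_foldl_max_pull _ _ cnt hc

theorem pvGoA_eq (t : List Char) (cs : List Int) (prev cnt : Int) (hc : 0 ≤ cnt) (hp : 0 ≤ prev)
    (hcs : ∀ c ∈ cs, 0 ≤ c) :
    pvGoA t prev cs cnt = max cnt (pvCost t prev cs) := by
  induction cs generalizing prev cnt with
  | nil =>
    unfold pvGoA pvCost
    rw [pv_slice_from_eq t prev hp, pvMaxRunA_eq t cnt prev _ hc]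
  | cons c cs ih =>
    unfold pvGoA pvCost
    rw [pvMaxRunA_eq t cnt prev c hc,
      ih c (max cnt (pvMfB t prev c)) (le_max_of_le_left hc)
        (hcs c List.mem_cons_self) (fun x hx => hcs x (List.mem_cons_of_mem _ hx)),
      max_assoc]

-- one pass of B's inner fold, against the combinations that extend the current prefix
theorem pvDp_inner (t : List Char) (k : Nat) (prev : Int)
    (IH : ∀ c : Int, pvDpB t k c = pvMList ((PySem.List.combinations
        (PySem.List.pyRange (c + 1) ((t.length : Int) - 1) 1) k).map (pvCost t c))) :
    ∀ (m : Nat) (a : Int) (best : Option Int), ((t.length : Int) - 1 - a).toNat = m →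
      (PySem.List.pyRange a ((t.length : Int) - 1) 1).foldl
        (fun best c =>
          match pvDpB t k c with
          | none => best
          | some rest =>
            let v := max (pvMfB t prev c) rest
            match best with
            | none => some v
            | some b => if v < b then some v else some b) best
      = pvOMin best (pvMList ((PySem.List.combinations
          (PySem.List.pyRange a ((t.length : Int) - 1) 1) (k + 1)).map (pvCost t prev))) := by
  intro m
  induction m with
  | zero =>
    intro a best h
    rw [PySem.List.pyRange_one_eq_nil (by omega), PySem.List.combinations_nil_succ]
    simp [pvMList, pvOMin_none_right]
  | succ m ihm =>
    intro a best h
    rw [PySem.List.pyRange_one_cons (by omega : a < (t.length : Int) - 1),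
      PySem.List.combinations_cons_succ]
    simp only [List.foldl_cons]
    rw [ihm (a + 1) _ (by omega), List.map_append, pvMList_append]
    have hm : pvMList (List.map (pvCost t prev) (List.map (fun c => a :: c)
          (PySem.List.combinations (PySem.List.pyRange (a + 1) ((t.length : Int) - 1) 1) k)))
        = pvOMax (pvMfB t prev a) (pvMList (List.map (pvCost t a)
          (PySem.List.combinations (PySem.List.pyRange (a + 1) ((t.length : Int) - 1) 1) k))) := by
      rw [List.map_map]
      exact pvMList_map_max (pvMfB t prev a) (pvCost t a) _
    rw [hm, ← pvOMin_assoc]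
    congr 1
    rw [IH a]
    cases hD : pvMList ((PySem.List.combinations
        (PySem.List.pyRange (a + 1) ((t.length : Int) - 1) 1) k).map (pvCost t a)) with
    | none => cases best <;> simp [pvOMin, pvOMax]
    | some rest =>
      cases best with
      | none => simp [pvOMin, pvOMax]
      | some b =>
        simp only [pvOMin, pvOMax]
        split <;> simp <;> omega

-- the DP value equals the min of the costs of all remaining combinations
theorem pvDpB_eq (t : List Char) :
    ∀ (k : Nat) (prev : Int),
      pvDpB t k prev =
        pvMList ((PySem.List.combinations (PySem.List.pyRange (prev + 1) ((t.length : Int) - 1) 1) k).map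
          (pvCost t prev)) := by
  intro k
  induction k with
  | zero =>
    intro prev
    simp [pvDpB, PySem.List.combinations_zero, pvMList, pvCost]
  | succ k ih =>
    intro prev
    unfold pvDpB
    rw [pvDp_inner t k prev ih _ (prev + 1) none rfl]
    rfl

theorem pv_fold_min_eq (l : List (List Int)) (f : List Int → Int) (i : Int) :
    l.foldl (fun ans c => min (f c) ans) i =
      match pvMList (l.map f) with
      | none => i
      | some v => min v i := by
  induction l generalizing i with
  | nil => rfl
  | cons x xs ih =>
    simp only [List.map_cons, List.foldl_cons, pvMList, ih]
    cases h : pvMList (xs.map f) <;> simp [min_left_comm]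

-- ===== VERDICT (by name: the statement is the Claim_ definition above) =====
theorem solution_spec : Claim_equal_solution := by
  intro s n _ hp
  have hp1 : (1 : Int) ≤ n := hp
  unfold Spec_solution solution solution_alt
  dsimp only
  by_cases hBig : n > max ((s.toList.length : Int) - 2) 0
  · rw [if_pos hBig]
    have hlen : (PySem.List.pyRange 1 ((s.toList.length : Int) - 1) 1).length < n.toNat := by
      rw [PySem.List.length_pyRange_one]; omega
    rw [PySem.List.combinations_eq_nil_of_length_lt _ hlen]
    rfl
  · rw [if_neg hBig]
    rw [PySem.List.foldl_congr_mem
      (PySem.List.combinations (PySem.List.pyRange 1 ((s.toList.length : Int) - 1) 1) n.toNat)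
      (fun answer combi => min (pvGoA s.toList 0 combi 0) answer)
      (fun answer combi => min (pvCost s.toList 0 combi) answer)
      300000
      (by
        intro acc combi hcombi
        have hmem : ∀ c ∈ combi, 0 ≤ c := by
          intro c hc
          have := (PySem.List.sublist_of_mem_combinations hcombi).mem hc
          have := (PySem.List.mem_pyRange_one.1 this).1
          omega
        simp only []
        rw [pvGoA_eq s.toList combi 0 0 le_rfl le_rfl hmem,
          max_eq_right (pvCost_nonneg s.toList 0 combi)])]
    rw [pv_fold_min_eq, pvDpB_eq s.toList n.toNat 0]
    norm_num

theorem solution_raises : Claim_raises_solution := by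
  unfold Claim_raises_solution
  exact ⟨fun s n _ hr hp => by simp [Raises_solution] at hr; simp [Pre_solution] at hp; omega, by decide⟩

-- self-check: the raise witness satisfies Raises_ and B's port returns the stated literal there
theorem pvRaiseWitness_ok :
    Raises_solution pvRaiseWitness_solution.1 pvRaiseWitness_solution.2 ∧
      solution_alt pvRaiseWitness_solution.1 pvRaiseWitness_solution.2 = pvRaiseWitnessOut_solution :=
  ⟨solution_raises.2.2.1, solution_raises.2.2.2⟩
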